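-- pv_equiv track=rewrite | github.com/pablodistel4/tda | taller1ej2.py | conversion
-- ===== SOURCE A (Python) =====
-- def conversion (x:int,y:int,pasos: list[int])->list[int]:
--     if (x==y):
--         return (pasos+ [y])
--
--     if (x>y):
--         return []
--
--     camino1:list[int]=conversion (x*2,y,pasos + [x])
--     camino2:list[int]=conversion ((x*10)+1,y,pasos + [x])
--
--     if (camino1==[] and camino2 != []):
--         return camino2
--     elif (camino1!=[] and camino2 == []):
--         return camino1
--
--     elif (camino1==[] and camino2 == []):
--         return []
--     elif (camino1!=[] and camino2 != []):
--         return camino1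
-- ===== SOURCE B (Python) =====
-- def conversion(x: int, y: int, pasos: list[int]) -> list[int]:
--     # Deterministic reverse walk from y: each value has at most one predecessor
--     # (halve if even, strip a trailing 1 digit otherwise), so no search is needed.
--     rev = []
--     cur = y
--     while cur > x and cur > 0:
--         rev.append(cur)
--         if cur % 2 == 0:
--             cur //= 2
--         elif cur % 10 == 1:
--             cur //= 10
--         else:
--             return []
--     if cur != x:
--         return []
--     return pasos + [x] + rev[::-1]
-- ===== Notes on version B (the rewrite author's own statement) =====
-- stated objective: alternative
-- what changed: Replaces A's recursive forward branching search (try x*2 and x*10+1 at every step) with a deterministic reverse walk from y (halve if even, strip a trailing 1 digit if it ends in 1), exploiting that every value has at most one predecessor; intended as faster, measured only ~1.3x at the largest timing size.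
import Mathlib
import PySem

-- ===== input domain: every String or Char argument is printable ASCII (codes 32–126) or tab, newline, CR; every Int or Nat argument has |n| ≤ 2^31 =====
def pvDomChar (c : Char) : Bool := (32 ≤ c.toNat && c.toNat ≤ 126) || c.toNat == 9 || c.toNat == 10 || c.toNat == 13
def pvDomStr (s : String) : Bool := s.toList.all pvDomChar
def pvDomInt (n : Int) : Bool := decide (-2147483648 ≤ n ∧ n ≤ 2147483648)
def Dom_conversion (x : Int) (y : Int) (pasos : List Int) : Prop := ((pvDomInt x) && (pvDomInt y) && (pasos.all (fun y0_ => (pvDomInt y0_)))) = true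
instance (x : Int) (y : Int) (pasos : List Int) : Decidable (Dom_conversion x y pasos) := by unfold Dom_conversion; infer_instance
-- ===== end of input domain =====

-- B replaces A's recursive forward branching search with a deterministic reverse walk
-- from y (halve if even, strip a trailing 1 digit); objective: alternative.

-- ===== PORT A =====
-- A's recursion diverges for x ≤ 0 < y, so the port carries a fuel counter (totality
-- guard only): fuel (y-x).toNat + 1 is enough on every input where Python A returns.
def conversionFuel : Nat → Int → Int → List Int → List Int
  | 0, _, _, _ => []
  | fuel+1, x, y, pasos =>
    if x = y then pasos ++ [y]
    else if x > y then []
    else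
      let camino1 := conversionFuel fuel (x*2) y (pasos ++ [x])
      let camino2 := conversionFuel fuel (x*10+1) y (pasos ++ [x])
      if camino1 = [] ∧ camino2 ≠ [] then camino2
      else if camino1 ≠ [] ∧ camino2 = [] then camino1
      else if camino1 = [] ∧ camino2 = [] then []
      else camino1  -- Python's final elif (camino1≠[] ∧ camino2≠[]) is the only case left

def conversion (x : Int) (y : Int) (pasos : List Int) : List Int :=
  conversionFuel ((y - x).toNat + 1) x y pasos

-- ===== PORT B =====
-- the while loop of Source B; fuel is a totality guard only (the loop strictly decreases
-- cur while cur > 0, so y.toNat + 1 iterations always suffice).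
def convLoop : Nat → Int → Int → List Int → Option (Int × List Int)
  | 0, _, _, _ => none
  | fuel+1, x, cur, rev =>
    if cur > x ∧ cur > 0 then
      if PySem.Int.mod cur 2 = 0 then convLoop fuel x (PySem.Int.floordiv cur 2) (rev ++ [cur])
      else if PySem.Int.mod cur 10 = 1 then convLoop fuel x (PySem.Int.floordiv cur 10) (rev ++ [cur])
      else none                                   -- "return []" inside the loop
    else some (cur, rev)                          -- loop exits normally

def conversion_alt (x : Int) (y : Int) (pasos : List Int) : List Int :=
  match convLoop (y.toNat + 1) x y [] with
  | none => []
  | some (cur, rev) => if cur ≠ x then [] else pasos ++ [x] ++ rev.reverse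

-- ===== PRECONDITION & SPEC =====
-- Pre_ excludes exactly x ≤ 0 ∧ x < y, where Python A recurses forever (RecursionError);
-- A returns normally on every input satisfying Pre_.
def Pre_conversion (x : Int) (y : Int) (pasos : List Int) : Prop := 1 ≤ x ∨ y ≤ x
instance (x : Int) (y : Int) (pasos : List Int) : Decidable (Pre_conversion x y pasos) := by
  unfold Pre_conversion; infer_instance

def pvWitness_conversion : Int × Int × List Int := (2, 16, [7])

def Spec_conversion (x : Int) (y : Int) (pasos : List Int) (out : List Int) : Prop :=
  out = conversion_alt x y pasos
instance (x : Int) (y : Int) (pasos : List Int) (out : List Int) : Decidable (Spec_conversion x y pasos out) := by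
  unfold Spec_conversion; infer_instance

-- ===== CLAIM (what is proved, stated in full; the proofs are below) =====
def Claim_equal_conversion : Prop := ∀ (x : Int) (y : Int) (pasos : List Int), Dom_conversion x y pasos → Pre_conversion x y pasos → Spec_conversion x y pasos (conversion x y pasos)

-- ===== LEMMAS AND PROOFS =====

-- Proof-side reverse walk from cur down to x, without accumulator: returns the
-- ascending path [x, …, cur] when it exists.
def bwd (x : Int) (cur : Int) : Option (List Int) :=
  if cur > x ∧ cur > 0 then
    if cur % 2 = 0 then (bwd x (cur / 2)).map (fun p => p ++ [cur])
    else if cur % 10 = 1 then (bwd x (cur / 10)).map (fun p => p ++ [cur])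
    else none
  else if cur = x then some [cur] else none
termination_by cur.toNat
decreasing_by all_goals omega

lemma bwd_self (x : Int) : bwd x x = some [x] := by
  rw [bwd]
  have h : ¬(x > x ∧ x > 0) := by omega
  rw [if_neg h, if_pos rfl]

lemma bwd_of_lt {x cur : Int} (h : cur < x) : bwd x cur = none := by
  rw [bwd]
  have h1 : ¬(cur > x ∧ cur > 0) := by omega
  rw [if_neg h1, if_neg (by omega : ¬ cur = x)]

lemma bwd_even {x cur : Int} (h1 : cur > x) (h2 : cur > 0) (h3 : cur % 2 = 0) :
    bwd x cur = (bwd x (cur / 2)).map (fun p => p ++ [cur]) := by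
  rw [bwd, if_pos ⟨h1, h2⟩, if_pos h3]

lemma bwd_ten {x cur : Int} (h1 : cur > x) (h2 : cur > 0) (h3 : ¬ cur % 2 = 0)
    (h4 : cur % 10 = 1) : bwd x cur = (bwd x (cur / 10)).map (fun p => p ++ [cur]) := by
  rw [bwd, if_pos ⟨h1, h2⟩, if_neg h3, if_pos h4]

lemma bwd_stuck {x cur : Int} (h1 : cur > x) (h2 : cur > 0) (h3 : ¬ cur % 2 = 0)
    (h4 : ¬ cur % 10 = 1) : bwd x cur = none := by
  rw [bwd, if_pos ⟨h1, h2⟩, if_neg h3, if_neg h4]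

-- The key fact: since each value has a unique predecessor, the reverse walk with
-- target x decomposes over the two forward moves x → x*2 and x → x*10+1.
lemma bwd_shift : ∀ (n : Nat) (x y : Int), y.toNat ≤ n → 1 ≤ x → x < y →
    bwd x y = (match bwd (x*2) y with
      | some p => some (x :: p)
      | none => (match bwd (x*10+1) y with
        | some p => some (x :: p)
        | none => none)) := by
  intro n
  induction n with
  | zero => intro x y hn hx hxy; exact absurd hn (by omega)
  | succ n ih =>
    intro x y hn hx hxy
    by_cases h2 : y % 2 = 0
    · by_cases hy2x : y = x*2
      · rw [bwd_even hxy (by omega) h2, (by omega : y / 2 = x), bwd_self]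
        rw [show bwd (x*2) y = some [x*2] from by rw [← hy2x]; exact bwd_self y]
        simp [hy2x]
      · by_cases hgt : y > x*2
        · have hrec := ih x (y/2) (by omega) hx (by omega)
          rw [bwd_even hxy (by omega) h2, hrec, bwd_even hgt (by omega) h2]
          by_cases h10 : y > x*10+1
          · rw [bwd_even h10 (by omega) h2]
            cases hb1 : bwd (x*2) (y/2) <;> cases hb2 : bwd (x*10+1) (y/2) <;> simp
          · rw [bwd_of_lt (by omega : y < x*10+1),
                bwd_of_lt (by omega : y/2 < x*10+1)]
            cases hb1 : bwd (x*2) (y/2) <;> simp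
        · rw [bwd_even hxy (by omega) h2, bwd_of_lt (by omega : y/2 < x),
              bwd_of_lt (by omega : y < x*2), bwd_of_lt (by omega : y < x*10+1)]
          simp
    · by_cases h10 : y % 10 = 1
      · by_cases heq : y = x*10+1
        · rw [bwd_ten hxy (by omega) h2 h10, (by omega : y / 10 = x), bwd_self,
              bwd_ten (by omega : y > x*2) (by omega) h2 h10, (by omega : y / 10 = x),
              bwd_of_lt (by omega : x < x*2)]
          rw [show bwd (x*10+1) y = some [x*10+1] from by rw [← heq]; exact bwd_self y]
          simp [heq]
        · by_cases hgt : y > x*10+1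
          · have hrec := ih x (y/10) (by omega) hx (by omega)
            rw [bwd_ten hxy (by omega) h2 h10, hrec,
                bwd_ten (by omega : y > x*2) (by omega) h2 h10,
                bwd_ten hgt (by omega) h2 h10]
            cases hb1 : bwd (x*2) (y/10) <;> cases hb2 : bwd (x*10+1) (y/10) <;> simp
          · rw [bwd_ten hxy (by omega) h2 h10, bwd_of_lt (by omega : y/10 < x),
                bwd_of_lt (by omega : y < x*10+1)]
            by_cases hg2 : y > x*2
            · rw [bwd_ten hg2 (by omega) h2 h10, bwd_of_lt (by omega : y/10 < x*2)]
              simp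
            · rw [bwd_of_lt (by omega : y < x*2)]
              simp
      · rw [bwd_stuck hxy (by omega) h2 h10]
        by_cases hg2 : y > x*2
        · rw [bwd_stuck hg2 (by omega) h2 h10]
          by_cases hg10 : y > x*10+1
          · rw [bwd_stuck hg10 (by omega) h2 h10]
          · rw [bwd_of_lt (by omega : y < x*10+1)]
        · rw [bwd_of_lt (by omega : y < x*2)]
          by_cases hg10 : y > x*10+1
          · rw [bwd_stuck hg10 (by omega) h2 h10]
          · rw [bwd_of_lt (by omega : y < x*10+1)]

-- Loop invariant: convLoop with enough fuel computes bwd, up to the rev accumulator.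
lemma loopInv : ∀ (f : Nat) (x cur : Int) (rev : List Int), cur.toNat < f →
    (match convLoop f x cur rev with
     | none => (none : Option (List Int))
     | some (c, r) => if c = x then some (x :: r.reverse) else none)
    = (bwd x cur).map (fun p => p ++ rev.reverse) := by
  intro f
  induction f with
  | zero => intro x cur rev hf; exact absurd hf (by omega)
  | succ f ih =>
    intro x cur rev hf
    simp only [convLoop]
    by_cases hg : cur > x ∧ cur > 0
    · rw [if_pos hg,
          PySem.Int.mod_eq_emod_of_pos (a := cur) (by omega : (0:Int) < 2),
          PySem.Int.mod_eq_emod_of_pos (a := cur) (by omega : (0:Int) < 10),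
          PySem.Int.floordiv_eq_ediv_of_pos (a := cur) (by omega : (0:Int) < 2),
          PySem.Int.floordiv_eq_ediv_of_pos (a := cur) (by omega : (0:Int) < 10)]
      by_cases h2 : cur % 2 = 0
      · rw [if_pos h2, bwd_even hg.1 hg.2 h2, ih x (cur/2) (rev ++ [cur]) (by omega)]
        cases hb : bwd x (cur / 2) <;> simp
      · rw [if_neg h2]
        by_cases h10 : cur % 10 = 1
        · rw [if_pos h10, bwd_ten hg.1 hg.2 h2 h10, ih x (cur/10) (rev ++ [cur]) (by omega)]
          cases hb : bwd x (cur / 10) <;> simp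
        · rw [if_neg h10, bwd_stuck hg.1 hg.2 h2 h10]; simp
    · rw [if_neg hg, bwd, if_neg hg]
      by_cases he : cur = x
      · rw [if_pos he]; simp [he]
      · rw [if_neg he]; simp [he]

lemma alt_eq (x y : Int) (pasos : List Int) :
    conversion_alt x y pasos = (match bwd x y with | none => [] | some p => pasos ++ p) := by
  unfold conversion_alt
  have h := loopInv (y.toNat + 1) x y [] (by omega)
  cases hc : convLoop (y.toNat + 1) x y [] with
  | none =>
    rw [hc] at h
    cases hb : bwd x y
    · simp
    · rw [hb] at h; simp at h
  | some cr =>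
    obtain ⟨c, r⟩ := cr
    rw [hc] at h
    simp only [] at h
    by_cases he : c = x
    · rw [if_pos he] at h
      cases hb : bwd x y with
      | none => rw [hb] at h; simp at h
      | some p =>
        rw [hb] at h
        simp at h
        simp [he, ← h]
    · rw [if_neg he] at h
      cases hb : bwd x y with
      | none => simp [he]
      | some p => rw [hb] at h; simp at h

lemma fuel_eq : ∀ (f : Nat) (x y : Int) (pasos : List Int), 1 ≤ x → (y - x).toNat < f →
    conversionFuel f x y pasos = (match bwd x y with | none => [] | some p => pasos ++ p) := by
  intro f
  induction f with
  | zero => intro x y pasos hx hf; exact absurd hf (by omega)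
  | succ f ih =>
    intro x y pasos hx hf
    simp only [conversionFuel]
    by_cases hxy : x = y
    · rw [if_pos hxy]; subst hxy; rw [bwd_self]
    · rw [if_neg hxy]
      by_cases hgt : x > y
      · rw [if_pos hgt, bwd_of_lt hgt]
      · rw [if_neg hgt]
        have h1 := ih (x*2) y (pasos ++ [x]) (by omega) (by omega)
        have h2 := ih (x*10+1) y (pasos ++ [x]) (by omega) (by omega)
        rw [bwd_shift y.toNat x y (le_refl _) hx (by omega)]
        cases hb1 : bwd (x*2) y <;> cases hb2 : bwd (x*10+1) y <;>
          rw [hb1] at h1 <;> rw [hb2] at h2 <;> rw [h1, h2] <;> simp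

-- ===== VERDICT (by name: the statement is the Claim_ definition above) =====
theorem conversion_spec : Claim_equal_conversion := by
  intro x y pasos hdom hpre
  unfold Spec_conversion
  rw [alt_eq]
  unfold conversion
  have hpre' : 1 ≤ x ∨ y ≤ x := hpre
  rcases hpre' with h | h
  · exact fuel_eq _ x y pasos h (by omega)
  · by_cases he : x = y
    · simp only [conversionFuel]
      rw [if_pos he]
      subst he
      rw [bwd_self]
    · simp only [conversionFuel]
      rw [if_neg he, if_pos (by omega : x > y), bwd_of_lt (by omega : y < x)]
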